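-- pv_equiv track=rewrite | github.com/yshiraz/smart-study-analyzer | main.py | study_time_by_subject
-- ===== SOURCE A (Python) =====
-- def study_time_by_subject(data):
--     subject_totals = {}
--
--     for row in data:
--         subject = row[1]
--         duration = int(row[2])
--
--         if subject in subject_totals:
--             subject_totals[subject] += duration
--         else:
--             subject_totals[subject] =  duration
--
--     return subject_totals
-- ===== SOURCE B (Python) =====
-- def study_time_by_subject(data):
--     pairs = [(row[1], int(row[2])) for row in data]
--     return {subject: sum(d for s, d in pairs if s == subject)
--             for subject in dict.fromkeys(s for s, _ in pairs)}
-- ===== Notes on version B (the rewrite author's own statement) =====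
-- stated objective: alternative
-- what changed: Replaces the incremental dict-accumulator scan by a two-phase plan: convert rows to (subject, duration) pairs once, dedupe subjects in first-occurrence order, then compute each subject's total with its own summation pass in a dict comprehension.
import Mathlib
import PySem

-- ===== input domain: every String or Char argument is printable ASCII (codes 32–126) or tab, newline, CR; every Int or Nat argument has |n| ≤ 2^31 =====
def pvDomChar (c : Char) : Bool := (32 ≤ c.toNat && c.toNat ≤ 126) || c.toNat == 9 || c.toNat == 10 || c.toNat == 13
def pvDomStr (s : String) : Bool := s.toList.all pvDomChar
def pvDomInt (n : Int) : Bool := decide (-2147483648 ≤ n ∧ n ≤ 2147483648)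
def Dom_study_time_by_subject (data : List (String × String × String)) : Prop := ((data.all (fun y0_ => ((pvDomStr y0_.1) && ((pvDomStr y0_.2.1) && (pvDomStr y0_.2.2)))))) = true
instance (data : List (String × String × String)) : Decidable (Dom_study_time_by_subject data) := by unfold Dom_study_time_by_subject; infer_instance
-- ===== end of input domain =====

-- B computes the same subject→total dict by a two-phase plan (pairs, dedup, per-subject sums)
-- instead of A's incremental dict accumulation; alternative structure, no speed claim.

-- ===== PORT A =====
def study_time_by_subject (data : List (String × String × String)) : List (String × Int) :=
  (data.foldl (fun subject_totals row =>
      let subject := row.2.1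
      let duration := (PySem.Int.ofStr? row.2.2).getD 0   -- int(row[2]); none (ValueError) excluded by Pre_
      if subject_totals.contains subject then
        subject_totals.insert subject (subject_totals.getD subject 0 + duration)
      else
        subject_totals.insert subject duration)
    PySem.Dict.empty).items

-- ===== PORT B =====
def study_time_by_subject_alt (data : List (String × String × String)) : List (String × Int) :=
  let pairs := data.map (fun row => (row.2.1, (PySem.Int.ofStr? row.2.2).getD 0))
  (PySem.List.dedup (pairs.map Prod.fst)).map
    (fun subject => (subject, ((pairs.filter (fun p => p.1 == subject)).map Prod.snd).sum))

-- ===== PRECONDITION & SPEC =====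
-- Pre_ excludes exactly the inputs where int(row[2]) raises ValueError in A (B raises there too).
def Pre_study_time_by_subject (data : List (String × String × String)) : Prop :=
  (data.all (fun row => (PySem.Int.ofStr? row.2.2).isSome)) = true
instance (data : List (String × String × String)) : Decidable (Pre_study_time_by_subject data) := by unfold Pre_study_time_by_subject; infer_instance
def pvWitness_study_time_by_subject : (List (String × String × String)) :=
  [("alice", "math", "30"), ("bob", "math", "15"), ("alice", "art", "7")]

def Spec_study_time_by_subject (data : List (String × String × String)) (out : List (String × Int)) : Prop := out = study_time_by_subject_alt data
instance (data : List (String × String × String)) (out : List (String × Int)) : Decidable (Spec_study_time_by_subject data out) := by unfold Spec_study_time_by_subject; infer_instance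

-- ===== CLAIM (what is proved, stated in full; the proofs are below) =====
def Claim_equal_study_time_by_subject : Prop := ∀ (data : List (String × String × String)), Dom_study_time_by_subject data → Pre_study_time_by_subject data → Spec_study_time_by_subject data (study_time_by_subject data)

-- ===== LEMMAS AND PROOFS =====

-- A's loop body is extensionally a single insert of (previous total + duration).
def pvIns (d : PySem.Dict String Int) (p : String × Int) : PySem.Dict String Int :=
  d.insert p.1 (d.getD p.1 0 + p.2)

lemma pvA_as_pairs (data : List (String × String × String)) :
    study_time_by_subject data =
      ((data.map (fun row => (row.2.1, (PySem.Int.ofStr? row.2.2).getD 0))).foldl pvIns PySem.Dict.empty).items := by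
  unfold study_time_by_subject
  rw [List.foldl_map]
  congr 1
  apply List.foldl_ext
  intro d row _
  by_cases h : d.contains row.2.1 = true
  · simp [pvIns, h]
  · simp only [Bool.not_eq_true] at h
    have h0 : d.getD row.2.1 0 = 0 := by
      rw [PySem.Dict.getD_of_not_contains]; simp [h]
    simp [pvIns, h, h0]

lemma pvGetD_foldl_ins (l : List (String × Int)) (d : PySem.Dict String Int) (c : String) :
    (l.foldl pvIns d).getD c 0 =
      d.getD c 0 + ((l.filter (fun p => p.1 == c)).map Prod.snd).sum := by
  induction l generalizing d with
  | nil => simp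
  | cons p t ih =>
    simp only [List.foldl_cons, ih, List.filter_cons]
    by_cases h : p.1 = c
    · simp [pvIns, h]
      ring
    · simp [pvIns, PySem.Dict.getD_insert, (show ¬ c = p.1 from fun hc => h hc.symm), h]

-- ===== VERDICT (by name: the statement is the Claim_ definition above) =====
theorem study_time_by_subject_spec : Claim_equal_study_time_by_subject := by
  intro data _ _
  unfold Spec_study_time_by_subject study_time_by_subject_alt
  rw [pvA_as_pairs]
  set pairs := data.map (fun row => (row.2.1, (PySem.Int.ofStr? row.2.2).getD 0)) with hp
  have hkeys : (pairs.foldl pvIns PySem.Dict.empty).keys = PySem.Set.ofList (pairs.map Prod.fst) := by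
    simpa [PySem.Set.update, PySem.Set.ofList_eq_foldl, PySem.Dict.keys_empty] using
      PySem.Dict.keys_foldl_insert_key pairs Prod.fst (fun d p => d.getD p.1 0 + p.2) PySem.Dict.empty
  have hnd : (pairs.foldl pvIns PySem.Dict.empty).keys.Nodup := by
    exact PySem.Dict.nodup_keys_foldl_insert_key pairs Prod.fst (fun d p => d.getD p.1 0 + p.2)
      PySem.Dict.empty (by simp)
  rw [PySem.Dict.items_eq_map_keys _ hnd 0, hkeys]
  simp only [PySem.List.dedup_eq_ofList]
  refine List.map_congr_left ?_
  intro k _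
  rw [pvGetD_foldl_ins]
  simp
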